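-- pv_equiv track=rewrite | github.com/MargineanMiruna/FP | Sem8/Aufg2/V2.py | build
-- ===== SOURCE A (Python) =====
-- import math
--
-- def build(num):
--     nc = int(math.log10(num)) + 1
--     new = 0
--     p = 1
--     ogl = 0
--     while num != 0:
--         uc = num % 10
--         num //= 10
--         if nc % 3 == 0:
--             ogl = ogl * 10 + uc
--             new = uc * p + new
--             p *= 10
--         nc -= 1
--     return new == ogl and new != 0
-- ===== SOURCE B (Python) =====
-- import math
--
-- def build(num):
--     # same digit count as A (preserves the ValueError on num <= 0)
--     L = int(math.log10(num)) + 1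
--     k = L // 3
--     def dig(j):  # j-th selected digit, counted from the most significant end
--         return num // 10 ** (L - 3 * (j + 1)) % 10
--     return all(dig(j) == dig(k - 1 - j) for j in range(k // 2)) and any(dig(j) != 0 for j in range(k))
-- ===== Notes on version B (the rewrite author's own statement) =====
-- stated objective: alternative
-- what changed: A streams over all digits once, maintaining forward/reversed numeric accumulators and a power of ten; B never loops over the digits: it computes the count of selected positions from the digit count and random-accesses each selected digit by floor-division with a power of 10, comparing mirror pairs two-pointer style and scanning for a nonzero digit.
import Mathlib
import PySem

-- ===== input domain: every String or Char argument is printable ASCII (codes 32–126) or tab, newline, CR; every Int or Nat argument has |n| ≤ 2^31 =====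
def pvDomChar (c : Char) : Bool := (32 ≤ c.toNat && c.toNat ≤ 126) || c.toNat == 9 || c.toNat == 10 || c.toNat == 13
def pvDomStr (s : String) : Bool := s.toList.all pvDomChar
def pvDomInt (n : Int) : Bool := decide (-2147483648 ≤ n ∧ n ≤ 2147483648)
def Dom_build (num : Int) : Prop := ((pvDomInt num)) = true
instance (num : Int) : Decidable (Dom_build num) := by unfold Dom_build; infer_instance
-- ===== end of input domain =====

-- B replaces A's digit-streaming loop with random access: it derives the number of selected
-- positions from the digit count and reads each selected digit directly via powers of ten,
-- comparing mirror pairs two-pointer style (alternative decomposition, same cost).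


-- ===== PORT A =====
-- int(math.log10(num)) + 1 = number of decimal digits; exact for 1 ≤ num ≤ 2^31 (Dom ∩ Pre)
def nDigits (n : Nat) : Int :=
  if _h : n < 10 then 1
  else 1 + nDigits (n / 10)
decreasing_by exact Nat.div_lt_self (by omega) (by omega)

-- the while loop; num ≥ 1 on Pre, so the loop runs over num.toNat
def buildLoop (n : Nat) (nc new p ogl : Int) : Int × Int :=
  if _h : n = 0 then (new, ogl)
  else
    let uc : Int := (n % 10 : Nat)
    if nc % 3 == 0 then
      buildLoop (n / 10) (nc - 1) (uc * p + new) (p * 10) (ogl * 10 + uc)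
    else
      buildLoop (n / 10) (nc - 1) new p ogl
decreasing_by all_goals exact Nat.div_lt_self (by omega) (by omega)

def build (num : Int) : Bool :=
  let nc := nDigits num.toNat
  let r := buildLoop num.toNat nc 0 1 0
  r.1 == r.2 && r.1 != 0

-- ===== PORT B =====
-- num // 10 ** (L - 3 * (j + 1)) % 10; the exponent is ≥ 0 at every call site, so .toNat is exact
def digB (num L j : Int) : Int :=
  PySem.Int.mod (PySem.Int.floordiv num (10 ^ (L - 3 * (j + 1)).toNat)) 10

def build_alt (num : Int) : Bool :=
  let L : Int := nDigits num.toNat   -- int(math.log10(num)) + 1, as in A's source line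
  let k : Int := PySem.Int.floordiv L 3
  ((PySem.List.pyRange 0 (PySem.Int.floordiv k 2) 1).all fun j =>
      digB num L j == digB num L (k - 1 - j)) &&
  ((PySem.List.pyRange 0 k 1).any fun j => digB num L j != 0)

-- ===== PRECONDITION & SPEC =====
-- math.log10 raises ValueError on nonpositive input, in A and in B alike
def Pre_build (num : Int) : Prop := 1 ≤ num
instance (num : Int) : Decidable (Pre_build num) := by unfold Pre_build; infer_instance
def pvWitness_build : Int := 123321
def Spec_build (num : Int) (out : Bool) : Prop := out = build_alt num
instance (num : Int) (out : Bool) : Decidable (Spec_build num out) := by unfold Spec_build; infer_instance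

-- ===== CLAIM (what is proved, stated in full; the proofs are below) =====
def Claim_equal_build : Prop := ∀ (num : Int), Dom_build num → Pre_build num → Spec_build num (build num)

-- ===== LEMMAS AND PROOFS =====

-- the selected digits of n (Python order of A's loop: least-significant selected digit first)
def sel (n : Nat) (nc : Int) : List Int :=
  if _h : n = 0 then []
  else (if nc % 3 == 0 then [((n % 10 : Nat) : Int)] else []) ++ sel (n / 10) (nc - 1)
decreasing_by exact Nat.div_lt_self (by omega) (by omega)

-- little-endian value of a digit list
def valLE (ds : List Int) : Int := ds.foldr (fun d acc => d + 10 * acc) 0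

-- big-endian value of a digit list
def beval (ds : List Int) : Int := ds.foldl (fun a d => a * 10 + d) 0

-- the selected digits read positionally: j-th selected digit from the most significant end
def esl (n L : Nat) : List Int :=
  (List.range (L / 3)).map (fun j => ((n / 10 ^ (L - 3 * (j + 1)) % 10 : Nat) : Int))

theorem valLE_concat (ds : List Int) (d : Int) :
    valLE (ds ++ [d]) = valLE ds + d * 10 ^ ds.length := by
  induction ds with
  | nil => simp [valLE]
  | cons x t ih => simp [valLE, List.foldr_append] at ih ⊢; rw [ih]; ring

theorem beval_concat (ds : List Int) (d : Int) :
    beval (ds ++ [d]) = beval ds * 10 + d := by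
  simp [beval, List.foldl_append]

theorem foldl_acc (ds : List Int) (a : Int) :
    ds.foldl (fun a d => a * 10 + d) a = a * 10 ^ ds.length + beval ds := by
  induction ds generalizing a with
  | nil => simp [beval]
  | cons x t ih =>
    have hb : beval (x :: t) = (0 * 10 + x) * 10 ^ t.length + beval t := by
      show List.foldl (fun a d => a * 10 + d) (0 * 10 + x) t = _
      rw [ih]
    rw [List.foldl_cons, ih, hb, List.length_cons]
    ring

theorem beval_eq_valLE_reverse (ds : List Int) : beval ds = valLE ds.reverse := by
  induction ds with
  | nil => simp [beval, valLE]
  | cons x t ih =>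
    rw [List.reverse_cons, valLE_concat, ← ih]
    show List.foldl (fun a d => a * 10 + d) (0 * 10 + x) t = _
    rw [foldl_acc, List.length_reverse]
    ring

theorem loop_sim (n : Nat) : ∀ (nc : Int) (ds : List Int),
    buildLoop n nc (valLE ds) (10 ^ ds.length) (beval ds) =
      (valLE (ds ++ sel n nc), beval (ds ++ sel n nc)) := by
  induction n using Nat.strong_induction_on with
  | _ n ih =>
    intro nc ds
    unfold buildLoop sel
    by_cases h : n = 0
    · simp [h]
    · simp only [h, dif_neg, not_false_iff]
      have hlt : n / 10 < n := Nat.div_lt_self (by omega) (by omega)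
      by_cases hc : nc % 3 = 0
      · simp only [hc, if_true, beq_self_eq_true]
        have h1 : ((n % 10 : Nat) : Int) * 10 ^ ds.length + valLE ds
            = valLE (ds ++ [((n % 10 : Nat) : Int)]) := by rw [valLE_concat]; ring
        have h2 : (10 : Int) ^ ds.length * 10 = 10 ^ (ds ++ [((n % 10 : Nat) : Int)]).length := by
          simp [pow_succ]
        have h3 : beval ds * 10 + ((n % 10 : Nat) : Int)
            = beval (ds ++ [((n % 10 : Nat) : Int)]) := (beval_concat _ _).symm
        rw [h1, h2, h3, ih _ hlt]
        simp
      · have : (nc % 3 == 0) = false := by simp [hc]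
        simp only [this]
        rw [ih _ hlt]
        simp

theorem sel_digits (n : Nat) : ∀ (nc : Int), ∀ d ∈ sel n nc, 0 ≤ d ∧ d < 10 := by
  induction n using Nat.strong_induction_on with
  | _ n ih =>
    intro nc d hd
    unfold sel at hd
    by_cases h : n = 0
    · simp [h] at hd
    · simp only [h, dif_neg, not_false_iff, List.mem_append] at hd
      have hlt : n / 10 < n := Nat.div_lt_self (by omega) (by omega)
      rcases hd with h1 | h1
      · by_cases hc : (nc % 3 == 0) = true
        · simp only [hc, if_true, List.mem_singleton] at h1
          subst h1
          have := Nat.mod_lt n (show 0 < 10 by omega)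
          constructor
          · positivity
          · omega
        · simp only [Bool.not_eq_true] at hc
          simp [hc] at h1
      · exact ih _ hlt _ _ h1

theorem valLE_nonneg (ds : List Int) (h : ∀ d ∈ ds, 0 ≤ d ∧ d < 10) : 0 ≤ valLE ds := by
  induction ds with
  | nil => simp [valLE]
  | cons x t ih =>
    have hx := h x (by simp)
    have ht := ih (fun d hd => h d (by simp [hd]))
    simp only [valLE, List.foldr_cons] at ht ⊢
    omega

theorem valLE_inj (xs : List Int) : ∀ (ys : List Int), xs.length = ys.length →
    (∀ d ∈ xs, 0 ≤ d ∧ d < 10) → (∀ d ∈ ys, 0 ≤ d ∧ d < 10) →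
    valLE xs = valLE ys → xs = ys := by
  induction xs with
  | nil => intro ys hlen _ _ _; exact (List.eq_nil_of_length_eq_zero hlen.symm).symm
  | cons x t ih =>
    intro ys hlen hx hy hv
    cases ys with
    | nil => simp at hlen
    | cons y u =>
      have hxd := hx x (by simp)
      have hyd := hy y (by simp)
      have htn := valLE_nonneg t (fun d hd => hx d (by simp [hd]))
      have hun := valLE_nonneg u (fun d hd => hy d (by simp [hd]))
      simp only [valLE, List.foldr_cons] at hv
      have hx' : x = y ∧ (List.foldr (fun d acc => d + 10 * acc) 0 t : Int)
          = List.foldr (fun d acc => d + 10 * acc) 0 u := by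
        unfold valLE at htn hun
        constructor <;> omega
      have := ih u (by simpa using hlen) (fun d hd => hx d (by simp [hd]))
        (fun d hd => hy d (by simp [hd])) hx'.2
      rw [hx'.1, this]

theorem valLE_eq_zero (ds : List Int) (h : ∀ d ∈ ds, 0 ≤ d ∧ d < 10) :
    valLE ds = 0 ↔ ∀ d ∈ ds, d = 0 := by
  induction ds with
  | nil => simp [valLE]
  | cons x t ih =>
    have hx := h x (by simp)
    have ht := fun d hd => h d (List.mem_cons_of_mem _ hd)
    have htn := valLE_nonneg t ht
    have := ih ht
    simp only [valLE, List.foldr_cons] at *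
    constructor
    · intro h0
      have hx0 : x = 0 ∧ (List.foldr (fun d acc => d + 10 * acc) 0 t : Int) = 0 := by
        constructor <;> omega
      intro d hd
      rcases List.mem_cons.mp hd with rfl | hd
      · exact hx0.1
      · exact (this.mp hx0.2) d hd
    · intro hall
      have hx0 := hall x (by simp)
      have ht0 := this.mpr (fun d hd => hall d (by simp [hd]))
      omega

-- A's result characterised: the selected-digit list is a nonzero palindrome
theorem A_char (num : Int) :
    build num = (decide (sel num.toNat (nDigits num.toNat) =
        (sel num.toNat (nDigits num.toNat)).reverse) &&
      (sel num.toNat (nDigits num.toNat)).any (fun d => d != 0)) := by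
  unfold build
  generalize num.toNat = n
  generalize nDigits n = nc
  have hsim := loop_sim n nc []
  simp only [List.nil_append, valLE, beval] at hsim
  show ((buildLoop n nc 0 1 0).1 == (buildLoop n nc 0 1 0).2 &&
      (buildLoop n nc 0 1 0).1 != 0) = _
  have h10 : ((1 : Int)) = 10 ^ ([] : List Int).length := by simp
  have : buildLoop n nc 0 1 0 = (valLE (sel n nc), beval (sel n nc)) := by
    have := loop_sim n nc []
    simpa [valLE, beval] using this
  rw [this]
  dsimp only
  set ds := sel n nc with hds
  have hdig : ∀ d ∈ ds, 0 ≤ d ∧ d < 10 := sel_digits n nc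
  have hrev : ∀ d ∈ ds.reverse, 0 ≤ d ∧ d < 10 := fun d hd => hdig d (List.mem_reverse.mp hd)
  have h1 : (valLE ds == beval ds) = decide (ds = ds.reverse) := by
    rw [beval_eq_valLE_reverse]
    by_cases h : ds = ds.reverse
    · simp [← h]
    · have : valLE ds ≠ valLE ds.reverse := by
        intro he
        exact h (valLE_inj ds ds.reverse (by simp) hdig hrev he)
      simp [h, this]
  have h2 : (valLE ds != 0) = ds.any (fun d => d != 0) := by
    by_cases h : valLE ds = 0
    · have := (valLE_eq_zero ds hdig).mp h
      simp only [h, bne_self_eq_false]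
      symm
      simp only [List.any_eq_false, bne_iff_ne, ne_eq, Decidable.not_not]
      exact this
    · have : ¬ ∀ d ∈ ds, d = 0 := fun hc => h ((valLE_eq_zero ds hdig).mpr hc)
      push Not at this
      obtain ⟨d, hd, hdne⟩ := this
      have hne : (valLE ds != 0) = true := by simpa using h
      rw [hne]
      symm
      rw [List.any_eq_true]
      exact ⟨d, hd, by simpa using hdne⟩
  rw [h1, h2]

-- nDigits is the exact decimal digit count
theorem nDigits_spec (n : Nat) (h : 1 ≤ n) :
    ∃ L : Nat, nDigits n = (L : Int) ∧ 1 ≤ L ∧ 10 ^ (L - 1) ≤ n ∧ n < 10 ^ L := by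
  induction n using Nat.strong_induction_on with
  | _ n ih =>
    unfold nDigits
    by_cases hs : n < 10
    · exact ⟨1, by simp [hs], by omega, by simpa using h, by simpa using hs⟩
    · have hlt : n / 10 < n := Nat.div_lt_self (by omega) (by omega)
      obtain ⟨L, hL, hL1, hlo, hhi⟩ := ih _ hlt (by omega)
      refine ⟨L + 1, ?_, by omega, ?_, ?_⟩
      · simp [hs, hL]; ring
      · have : 10 ^ L = 10 ^ (L - 1) * 10 := by
          rw [← pow_succ]; congr 1; omega
        have h1 : 10 * (n / 10) ≤ n := by omega
        calc 10 ^ (L + 1 - 1) = 10 ^ (L - 1) * 10 := by simpa using this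
        _ ≤ (n / 10) * 10 := by exact Nat.mul_le_mul_right 10 hlo
        _ ≤ n := by omega
      · have : n < (n / 10) * 10 + 10 := by omega
        calc n < (n / 10) * 10 + 10 := this
        _ ≤ (10 ^ L - 1) * 10 + 10 := by
            have : n / 10 ≤ 10 ^ L - 1 := by omega
            exact Nat.add_le_add_right (Nat.mul_le_mul_right 10 this) 10
        _ ≤ 10 ^ (L + 1) := by rw [pow_succ]; have : 1 ≤ 10 ^ L := Nat.one_le_pow _ _ (by omega); omega

-- sel 0 is empty for every counter value
theorem sel_zero (c : Int) : sel 0 c = [] := by rw [sel]; simp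

-- the loop's selected digits, read positionally (most significant selected digit first, reversed)
theorem sel_eq_esl_reverse (L : Nat) : ∀ n : Nat, 1 ≤ L → 10 ^ (L - 1) ≤ n → n < 10 ^ L →
    sel n (L : Int) = (esl n L).reverse := by
  induction L with
  | zero => intro n h; omega
  | succ L ihL =>
    intro n _ hlo hhi
    have hn : n ≠ 0 := by
      have : 1 ≤ 10 ^ (L + 1 - 1) := Nat.one_le_pow _ _ (by omega)
      omega
    rw [sel, dif_neg hn]
    by_cases hL0 : L = 0
    · subst hL0
      have hnd : n / 10 = 0 := Nat.div_eq_of_lt (by simpa using hhi)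
      norm_num [hnd, sel_zero, esl]
    · -- L + 1 ≥ 2; n / 10 has exactly L digits
      have hlo' : 10 ^ (L - 1) ≤ n / 10 := by
        have h1 : 10 ^ (L - 1) * 10 ≤ n := by
          have : 10 ^ (L - 1) * 10 = 10 ^ L := by rw [← pow_succ]; congr 1; omega
          rw [this]; simpa using hlo
        omega
      have hhi' : n / 10 < 10 ^ L := by
        have : n < 10 ^ L * 10 := by rw [← pow_succ]; exact hhi
        omega
      have ih := ihL (n / 10) (by omega) hlo' hhi'
      have hcast : ((L + 1 : Nat) : Int) - 1 = (L : Int) := by push_cast; ring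
      rw [hcast, ih]
      -- positional digits of n/10 at length L are those of n at length L+1
      have hdig : ∀ j : Nat, 3 * (j + 1) ≤ L →
          (n / 10) / 10 ^ (L - 3 * (j + 1)) % 10 = n / 10 ^ (L + 1 - 3 * (j + 1)) % 10 := by
        intro j hj
        have he : L - 3 * (j + 1) + 1 = L + 1 - 3 * (j + 1) := by omega
        rw [Nat.div_div_eq_div_mul, ← pow_succ', he]
      by_cases h3 : (L + 1) % 3 = 0
      · have hsel : (((L + 1 : Nat) : Int) % 3 == 0) = true := by
          simp only [beq_iff_eq]; omega
        rw [hsel, if_pos rfl]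
        have hk : (L + 1) / 3 = L / 3 + 1 := by omega
        have hR : esl n (L + 1) =
            (List.range (L / 3)).map (fun j => ((n / 10 ^ (L + 1 - 3 * (j + 1)) % 10 : Nat) : Int))
              ++ [((n % 10 : Nat) : Int)] := by
          simp only [esl, hk, List.range_succ, List.map_append, List.map_cons, List.map_nil]
          congr 2
          have h0 : L + 1 - 3 * (L / 3 + 1) = 0 := by omega
          rw [h0]
          simp
        rw [hR, List.reverse_append]
        simp only [List.reverse_cons, List.reverse_nil, List.nil_append, List.singleton_append]
        congr 2
        apply List.map_congr_left
        intro j hj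
        rw [List.mem_range] at hj
        congr 1
        exact hdig j (by omega)
      · have hsel : (((L + 1 : Nat) : Int) % 3 == 0) = false := by
          simp only [beq_eq_false_iff_ne, ne_eq]; omega
        rw [hsel]
        simp only [Bool.false_eq_true, if_false, List.nil_append]
        have hk : (L + 1) / 3 = L / 3 := by omega
        simp only [esl, hk]
        congr 1
        apply List.map_congr_left
        intro j hj
        rw [List.mem_range] at hj
        congr 1
        exact hdig j (by omega)

-- palindromicity of a list via its first half of mirror pairs
theorem palindrome_iff_half (l : List Int) :
    l = l.reverse ↔ ∀ j, j < l.length / 2 → l.getD j 0 = l.getD (l.length - 1 - j) 0 := by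
  constructor
  · intro h j hj
    have hjl : j < l.length := by omega
    rw [List.getD_eq_getElem?_getD, List.getD_eq_getElem?_getD]
    conv_lhs => rw [h]
    rw [List.getElem?_reverse hjl]
  · intro h
    have key : ∀ m, m < l.length → l[m]? = some (l.getD m 0) := fun m hm => by
      rw [List.getElem?_eq_getElem hm, List.getD_eq_getElem l 0 hm]
    apply List.ext_getElem?
    intro i
    by_cases hi : i < l.length
    · rw [List.getElem?_reverse hi, key i hi, key (l.length - 1 - i) (by omega)]
      have pair : ∀ m, m < l.length / 2 → l.getD m 0 = l.getD (l.length - 1 - m) 0 := h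
      by_cases hh : i < l.length / 2
      · rw [pair i hh]
      · by_cases hmid : l.length - 1 - i = i
        · rw [hmid]
        · have hlt : l.length - 1 - i < l.length / 2 := by omega
          have := pair _ hlt
          have hii : l.length - 1 - (l.length - 1 - i) = i := by omega
          rw [hii] at this
          rw [this]
    · rw [List.getElem?_eq_none (l := l) (by omega),
        List.getElem?_eq_none (l := l.reverse) (by simp; omega)]

-- the j-th selected digit of n (counted from the most significant end), as a natural number
def dig (n L j : Nat) : Nat := n / 10 ^ (L - 3 * (j + 1)) % 10

theorem digB_eq (n L j : Nat) (hj : 3 * (j + 1) ≤ L) :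
    digB (n : Int) (L : Int) (j : Int) = ((dig n L j : Nat) : Int) := by
  unfold digB dig
  have he : (((L : Int) - 3 * ((j : Int) + 1))).toNat = L - 3 * (j + 1) := by omega
  rw [he]
  have h10 : (10 : Int) ^ (L - 3 * (j + 1)) = ((10 ^ (L - 3 * (j + 1)) : Nat) : Int) := by
    push_cast; ring
  rw [h10, PySem.Int.floordiv_natCast]
  exact_mod_cast PySem.Int.mod_natCast (n / 10 ^ (L - 3 * (j + 1))) 10

theorem esl_getD (n L j : Nat) (hj : j < L / 3) :
    (esl n L).getD j 0 = ((dig n L j : Nat) : Int) := by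
  have hlen : (esl n L).length = L / 3 := by simp [esl]
  rw [List.getD_eq_getElem _ _ (by rw [hlen]; exact hj)]
  simp [esl, dig]

-- B's result characterised over the same positional selected-digit list
theorem B_char (num : Int) (n L : Nat) (hnum : num = (n : Int)) (hL : nDigits n = (L : Int)) :
    build_alt num = (decide (esl n L = (esl n L).reverse) &&
      (esl n L).any (fun d => d != 0)) := by
  subst hnum
  unfold build_alt
  rw [Int.toNat_natCast, hL]
  dsimp only
  rw [show PySem.Int.floordiv (L : Int) 3 = ((L / 3 : Nat) : Int) from by
    exact_mod_cast PySem.Int.floordiv_natCast L 3]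
  rw [show PySem.Int.floordiv ((L / 3 : Nat) : Int) 2 = ((L / 3 / 2 : Nat) : Int) from by
    exact_mod_cast PySem.Int.floordiv_natCast (L / 3) 2]
  rw [PySem.List.pyRange_zero_nat, PySem.List.pyRange_zero_nat]
  rw [List.all_map, List.any_map]
  have hlen : (esl n L).length = L / 3 := by simp [esl]
  congr 1
  · -- the mirror-pair check is exactly palindromicity
    rw [Bool.eq_iff_iff]
    simp only [List.all_eq_true, List.mem_range, Function.comp, beq_iff_eq, decide_eq_true_eq]
    rw [palindrome_iff_half, hlen]
    have hc : ∀ j : Nat, j < L / 3 / 2 →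
        ((L / 3 : Nat) : Int) - 1 - (j : Int) = ((L / 3 - 1 - j : Nat) : Int) := by
      intro j hj; omega
    constructor
    · intro hall j hj
      have := hall j hj
      rw [hc j hj, digB_eq n L j (by omega), digB_eq n L _ (by omega)] at this
      rw [esl_getD n L j (by omega), esl_getD n L _ (by omega)]
      exact_mod_cast this
    · intro hp j hj
      have := hp j hj
      rw [esl_getD n L j (by omega), esl_getD n L _ (by omega)] at this
      rw [hc j hj, digB_eq n L j (by omega), digB_eq n L _ (by omega)]
      exact_mod_cast this
  · -- the nonzero check
    rw [Bool.eq_iff_iff]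
    simp only [List.any_eq_true, List.mem_range, Function.comp, bne_iff_ne, ne_eq, esl,
      List.mem_map]
    constructor
    · rintro ⟨j, hj, hne⟩
      refine ⟨((n / 10 ^ (L - 3 * (j + 1)) % 10 : Nat) : Int), ⟨j, hj, rfl⟩, ?_⟩
      rw [digB_eq n L j (by omega)] at hne
      exact_mod_cast hne
    · rintro ⟨d, ⟨j, hj, rfl⟩, hne⟩
      refine ⟨j, hj, ?_⟩
      rw [digB_eq n L j (by omega)]
      exact_mod_cast hne

-- ===== VERDICT (by name: the statement is the Claim_ definition above) =====
theorem build_spec : Claim_equal_build := by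
  intro num _ hpre
  unfold Pre_build at hpre
  unfold Spec_build
  have hn : num = ((num.toNat : Nat) : Int) := by omega
  obtain ⟨L, hL, hL1, hlo, hhi⟩ := nDigits_spec num.toNat (by omega)
  rw [A_char, hL, sel_eq_esl_reverse L num.toNat hL1 hlo hhi,
    B_char num num.toNat L hn hL]
  rw [List.reverse_reverse, List.any_reverse]
  congr 1
  rw [decide_eq_decide]
  exact eq_comm
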